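-- pv_equiv track=rewrite | github.com/AmiyaMihari/Programacion_Informatica_2doSemestre | comparacionArchivos.py/comparacionArchivos.py | comparar_listas_lineas
-- ===== SOURCE A (Python) =====
-- def comparar_listas_lineas(lineas1, lineas2):
--     """
--     Compara las dos listas de líneas (una por cada archivo).
--     Genera una lista de cadenas que describe las diferencias.
--     """
--     # Lista para almacenar los mensajes de diferencias
--     diferencias = []
--
--     # Se obtiene la cantidad de líneas de cada archivo
--     len1 = len(lineas1)
--     len2 = len(lineas2)
--
--     # Se usa la longitud máxima para asegurar que se recorran todas las líneas
--     max_len = max(len1, len2)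
--
--     # Se inicia la iteración comparativa línea por línea
--     for i in range(max_len):
--         numero_linea = i + 1
--
--         # Caso 1: La línea existe en ambos archivos
--         if i < len1 and i < len2:
--             # Se comparan las líneas en la misma posición
--             if lineas1[i] != lineas2[i]:
--                 # Se registra la discrepancia si son diferentes
--                 diferencias.append(f"\n[Línea {numero_linea} es diferente]")
--                 diferencias.append(f"  -> Archivo 1: '{lineas1[i]}'")
--                 diferencias.append(f"  -> Archivo 2: '{lineas2[i]}'")
--
--         # Caso 2: La línea solo existe en el archivo 1 (archivo 1 es más largo)
--         elif i < len1:
--             diferencias.append(f"\n[Línea {numero_linea} solo existe en el Archivo 1]")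
--             diferencias.append(f"  -> Archivo 1: '{lineas1[i]}'")
--
--         # Caso 3: La línea solo existe en el archivo 2 (archivo 2 es más largo)
--         elif i < len2:
--             diferencias.append(f"\n[Línea {numero_linea} solo existe en el Archivo 2]")
--             diferencias.append(f"  -> Archivo 2: '{lineas2[i]}'")
--
--     return diferencias
-- ===== SOURCE B (Python) =====
-- def comparar_listas_lineas(lineas1, lineas2):
--     """Same comparison, decomposed as one zip pass over the common prefix
--     plus one pass over the tail of the longer file."""
--     diferencias = []
--     for n, (a, b) in enumerate(zip(lineas1, lineas2), start=1):
--         if a != b: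
--             diferencias.append(f"\n[Línea {n} es diferente]")
--             diferencias.append(f"  -> Archivo 1: '{a}'")
--             diferencias.append(f"  -> Archivo 2: '{b}'")
--     min_len = min(len(lineas1), len(lineas2))
--     if len(lineas2) < len(lineas1):
--         for n, a in enumerate(lineas1[min_len:], start=min_len + 1):
--             diferencias.append(f"\n[Línea {n} solo existe en el Archivo 1]")
--             diferencias.append(f"  -> Archivo 1: '{a}'")
--     elif len(lineas1) < len(lineas2):
--         for n, b in enumerate(lineas2[min_len:], start=min_len + 1):
--             diferencias.append(f"\n[Línea {n} solo existe en el Archivo 2]")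
--             diferencias.append(f"  -> Archivo 2: '{b}'")
--     return diferencias
-- ===== Notes on version B (the rewrite author's own statement) =====
-- stated objective: simpler
-- what changed: Replaces the single index loop over range(max_len) with its three-way branch and per-index bounds tests by a zip pass over the common prefix plus one slice pass over the tail of the longer list, with no index arithmetic or bounds checks.
import Mathlib
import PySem

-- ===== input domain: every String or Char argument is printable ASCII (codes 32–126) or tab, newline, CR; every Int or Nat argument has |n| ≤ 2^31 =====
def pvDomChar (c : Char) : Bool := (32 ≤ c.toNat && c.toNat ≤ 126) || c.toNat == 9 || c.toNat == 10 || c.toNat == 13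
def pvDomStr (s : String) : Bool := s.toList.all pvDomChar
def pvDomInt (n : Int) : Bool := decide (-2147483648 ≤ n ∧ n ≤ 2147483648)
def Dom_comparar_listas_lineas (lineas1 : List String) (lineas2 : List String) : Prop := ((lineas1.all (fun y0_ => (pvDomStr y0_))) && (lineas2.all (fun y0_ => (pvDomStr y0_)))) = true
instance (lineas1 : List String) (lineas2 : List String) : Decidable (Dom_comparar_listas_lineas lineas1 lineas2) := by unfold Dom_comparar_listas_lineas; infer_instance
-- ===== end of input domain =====

-- B replaces A's single indexed loop over range(max_len) by a zip pass over the common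
-- prefix followed by one pass over the tail of the longer list (objective: simpler).


-- message constructors shared by both ports (pure f-string formatting)
def pvMsgDiff (n : Int) : String := "\n[Línea " ++ PySem.Int.toStr n ++ " es diferente]"
def pvMsgOnly (n : Int) (k : String) : String := "\n[Línea " ++ PySem.Int.toStr n ++ " solo existe en el Archivo " ++ k ++ "]"
def pvMsgA1 (s : String) : String := "  -> Archivo 1: '" ++ s ++ "'"
def pvMsgA2 (s : String) : String := "  -> Archivo 2: '" ++ s ++ "'"

-- ===== PORT A =====
def comparar_listas_lineas (lineas1 : List String) (lineas2 : List String) : List String :=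
  let diferencias : List String := []
  let len1 : Int := lineas1.length
  let len2 : Int := lineas2.length
  let max_len : Int := max len1 len2
  (PySem.List.pyRange 0 max_len 1).foldl (fun diferencias i =>
    let numero_linea := i + 1
    if i < len1 ∧ i < len2 then
      if PySem.List.pyGetD lineas1 i "" ≠ PySem.List.pyGetD lineas2 i "" then
        diferencias ++ [pvMsgDiff numero_linea,
                        pvMsgA1 (PySem.List.pyGetD lineas1 i ""),
                        pvMsgA2 (PySem.List.pyGetD lineas2 i "")]
      else diferencias
    else if i < len1 then
      diferencias ++ [pvMsgOnly numero_linea "1", pvMsgA1 (PySem.List.pyGetD lineas1 i "")]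
    else if i < len2 then
      diferencias ++ [pvMsgOnly numero_linea "2", pvMsgA2 (PySem.List.pyGetD lineas2 i "")]
    else diferencias) diferencias

-- ===== PORT B =====
-- the zip pass over the common prefix, counter n = 1-based line number
def pvZipDiffs : Int → List String → List String → List String
  | n, a :: as, b :: bs =>
      (if a ≠ b then [pvMsgDiff n, pvMsgA1 a, pvMsgA2 b] else []) ++ pvZipDiffs (n + 1) as bs
  | _, _, _ => []

-- the tail pass over lineas1[min_len:]
def pvTail1 : Int → List String → List String
  | n, a :: as => pvMsgOnly n "1" :: pvMsgA1 a :: pvTail1 (n + 1) as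
  | _, [] => []

-- the tail pass over lineas2[min_len:]
def pvTail2 : Int → List String → List String
  | n, b :: bs => pvMsgOnly n "2" :: pvMsgA2 b :: pvTail2 (n + 1) bs
  | _, [] => []

def comparar_listas_lineas_alt (lineas1 : List String) (lineas2 : List String) : List String :=
  let min_len : Nat := min lineas1.length lineas2.length
  pvZipDiffs 1 lineas1 lineas2 ++
    (if lineas2.length < lineas1.length then pvTail1 ((min_len : Int) + 1) (lineas1.drop min_len)
     else if lineas1.length < lineas2.length then pvTail2 ((min_len : Int) + 1) (lineas2.drop min_len)
     else [])

-- ===== PRECONDITION & SPEC =====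
def Spec_comparar_listas_lineas (lineas1 : List String) (lineas2 : List String) (out : List String) : Prop := out = comparar_listas_lineas_alt lineas1 lineas2
instance (lineas1 : List String) (lineas2 : List String) (out : List String) : Decidable (Spec_comparar_listas_lineas lineas1 lineas2 out) := by unfold Spec_comparar_listas_lineas; infer_instance

-- ===== CLAIM (what is proved, stated in full; the proofs are below) =====
def Claim_equal_comparar_listas_lineas : Prop := ∀ (lineas1 : List String) (lineas2 : List String), Dom_comparar_listas_lineas lineas1 lineas2 → Spec_comparar_listas_lineas lineas1 lineas2 (comparar_listas_lineas lineas1 lineas2)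

-- ===== LEMMAS AND PROOFS =====

-- what A's loop body contributes at index i
def pvG (l1 l2 : List String) (i : Int) : List String :=
  if i < (l1.length : Int) ∧ i < (l2.length : Int) then
    if PySem.List.pyGetD l1 i "" ≠ PySem.List.pyGetD l2 i "" then
      [pvMsgDiff (i + 1), pvMsgA1 (PySem.List.pyGetD l1 i ""), pvMsgA2 (PySem.List.pyGetD l2 i "")]
    else []
  else if i < (l1.length : Int) then
    [pvMsgOnly (i + 1) "1", pvMsgA1 (PySem.List.pyGetD l1 i "")]
  else if i < (l2.length : Int) then
    [pvMsgOnly (i + 1) "2", pvMsgA2 (PySem.List.pyGetD l2 i "")]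
  else []

lemma A_eq_flatMap (l1 l2 : List String) :
    comparar_listas_lineas l1 l2
      = (PySem.List.pyRange 0 (max (l1.length : Int) (l2.length : Int)) 1).flatMap (pvG l1 l2) := by
  unfold comparar_listas_lineas
  have hbody : (fun (diferencias : List String) (i : Int) =>
      let numero_linea := i + 1
      if i < (l1.length : Int) ∧ i < (l2.length : Int) then
        if PySem.List.pyGetD l1 i "" ≠ PySem.List.pyGetD l2 i "" then
          diferencias ++ [pvMsgDiff numero_linea,
                          pvMsgA1 (PySem.List.pyGetD l1 i ""),
                          pvMsgA2 (PySem.List.pyGetD l2 i "")]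
        else diferencias
      else if i < (l1.length : Int) then
        diferencias ++ [pvMsgOnly numero_linea "1", pvMsgA1 (PySem.List.pyGetD l1 i "")]
      else if i < (l2.length : Int) then
        diferencias ++ [pvMsgOnly numero_linea "2", pvMsgA2 (PySem.List.pyGetD l2 i "")]
      else diferencias)
      = (fun acc i => acc ++ pvG l1 l2 i) := by
    funext acc i
    simp only [pvG]
    split_ifs <;> simp
  simp only [hbody]
  exact PySem.List.foldl_append_eq_flatMap _ _ _

lemma pvZipDiffs_nil_right (n : Int) (xs : List String) : pvZipDiffs n xs [] = [] := by
  cases xs <;> rfl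

lemma pvG_at (l1 l2 : List String) (j : Nat) :
    pvG l1 l2 (j : Int) =
      if h1 : j < l1.length then
        if h2 : j < l2.length then
          (if l1[j] ≠ l2[j] then [pvMsgDiff ((j : Int) + 1), pvMsgA1 l1[j], pvMsgA2 l2[j]] else [])
        else [pvMsgOnly ((j : Int) + 1) "1", pvMsgA1 l1[j]]
      else if h2 : j < l2.length then [pvMsgOnly ((j : Int) + 1) "2", pvMsgA2 l2[j]]
      else [] := by
  simp only [pvG, PySem.List.pyGetD_natCast]
  by_cases h1 : j < l1.length <;> by_cases h2 : j < l2.length <;>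
    simp [h1, h2, List.getD_eq_getElem?_getD]

-- tail region, file 1 longer (or equal): indices ≥ len2
lemma tail1_flat (l1 l2 : List String) :
    ∀ (k j : Nat), l1.length - j ≤ k → l2.length ≤ j →
      (PySem.List.pyRange (j : Int) (max (l1.length : Int) (l2.length : Int)) 1).flatMap (pvG l1 l2)
        = pvTail1 ((j : Int) + 1) (l1.drop j) := by
  intro k
  induction k with
  | zero =>
      intro j hk hj
      have h1 : l1.length ≤ j := by omega
      rw [PySem.List.pyRange_one_eq_nil (by simp; omega), List.drop_eq_nil_of_le h1]
      rfl
  | succ k ih =>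
      intro j hk hj
      by_cases hlt : j < l1.length
      · rw [PySem.List.pyRange_one_cons (by simp; omega)]
        rw [List.flatMap_cons, pvG_at]
        rw [List.drop_eq_getElem_cons hlt]
        simp only [dif_pos hlt, dif_neg (by omega : ¬ j < l2.length)]
        have : ((j : Int) + 1) = ((j + 1 : Nat) : Int) := by push_cast; ring
        rw [this, ih (j + 1) (by omega) (by omega)]
        simp [pvTail1]
      · have h1 : l1.length ≤ j := by omega
        rw [PySem.List.pyRange_one_eq_nil (by simp; omega), List.drop_eq_nil_of_le h1]
        rfl

-- tail region, file 2 longer (or equal): indices ≥ len1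
lemma tail2_flat (l1 l2 : List String) :
    ∀ (k j : Nat), l2.length - j ≤ k → l1.length ≤ j →
      (PySem.List.pyRange (j : Int) (max (l1.length : Int) (l2.length : Int)) 1).flatMap (pvG l1 l2)
        = pvTail2 ((j : Int) + 1) (l2.drop j) := by
  intro k
  induction k with
  | zero =>
      intro j hk hj
      have h2 : l2.length ≤ j := by omega
      rw [PySem.List.pyRange_one_eq_nil (by simp; omega), List.drop_eq_nil_of_le h2]
      rfl
  | succ k ih =>
      intro j hk hj
      by_cases hlt : j < l2.length
      · rw [PySem.List.pyRange_one_cons (by simp; omega)]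
        rw [List.flatMap_cons, pvG_at]
        rw [List.drop_eq_getElem_cons hlt]
        simp only [dif_neg (by omega : ¬ j < l1.length), dif_pos hlt]
        have : ((j : Int) + 1) = ((j + 1 : Nat) : Int) := by push_cast; ring
        rw [this, ih (j + 1) (by omega) (by omega)]
        simp [pvTail2]
      · have h2 : l2.length ≤ j := by omega
        rw [PySem.List.pyRange_one_eq_nil (by simp; omega), List.drop_eq_nil_of_le h2]
        rfl

-- common prefix: the flatMap from j splits into the zip pass from j plus the remaining range
lemma prefix_flat (l1 l2 : List String) :
    ∀ (k j : Nat), min l1.length l2.length - j ≤ k → j ≤ min l1.length l2.length →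
      (PySem.List.pyRange (j : Int) (max (l1.length : Int) (l2.length : Int)) 1).flatMap (pvG l1 l2)
        = pvZipDiffs ((j : Int) + 1) (l1.drop j) (l2.drop j)
          ++ (PySem.List.pyRange ((min l1.length l2.length : Nat) : Int)
                (max (l1.length : Int) (l2.length : Int)) 1).flatMap (pvG l1 l2) := by
  intro k
  induction k with
  | zero =>
      intro j hk hj
      have hje : j = min l1.length l2.length := by omega
      subst hje
      rcases Nat.le_total l1.length l2.length with h | h
      · rw [Nat.min_eq_left h, List.drop_eq_nil_of_le le_rfl]
        simp [pvZipDiffs]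
      · rw [Nat.min_eq_right h, List.drop_eq_nil_of_le (le_refl l2.length)]
        rw [pvZipDiffs_nil_right]
        simp
  | succ k ih =>
      intro j hk hj
      by_cases hlt : j < min l1.length l2.length
      · have h1 : j < l1.length := by omega
        have h2 : j < l2.length := by omega
        rw [PySem.List.pyRange_one_cons (by simp; omega)]
        rw [List.flatMap_cons, pvG_at]
        simp only [dif_pos h1, dif_pos h2]
        rw [List.drop_eq_getElem_cons h1, List.drop_eq_getElem_cons h2]
        have hc : ((j : Int) + 1) = ((j + 1 : Nat) : Int) := by push_cast; ring
        rw [hc, ih (j + 1) (by omega) (by omega)]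
        simp only [pvZipDiffs]
        push_cast
        simp [List.append_assoc]
      · have hje : j = min l1.length l2.length := by omega
        subst hje
        rcases Nat.le_total l1.length l2.length with h | h
        · rw [Nat.min_eq_left h, List.drop_eq_nil_of_le le_rfl]
          simp [pvZipDiffs]
        · rw [Nat.min_eq_right h, List.drop_eq_nil_of_le (le_refl l2.length)]
          rw [pvZipDiffs_nil_right]
          simp

-- ===== VERDICT (by name: the statement is the Claim_ definition above) =====
theorem comparar_listas_lineas_spec : Claim_equal_comparar_listas_lineas := by
  intro l1 l2 _
  unfold Spec_comparar_listas_lineas comparar_listas_lineas_alt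
  rw [A_eq_flatMap]
  have h0 : ((0 : Nat) : Int) = (0 : Int) := by norm_num
  have hpre := prefix_flat l1 l2 (min l1.length l2.length) 0 (by omega) (by omega)
  rw [h0] at hpre
  rw [hpre]
  simp only [List.drop_zero]
  congr 1
  rcases lt_trichotomy l1.length l2.length with h | h | h
  · rw [if_neg (by omega), if_pos (by exact_mod_cast h)]
    exact tail2_flat l1 l2 (l2.length - min l1.length l2.length)
      (min l1.length l2.length) (by omega) (by omega)
  · rw [if_neg (by omega), if_neg (by omega)]
    rw [PySem.List.pyRange_one_eq_nil (by simp; omega)]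
    rfl
  · rw [if_pos (by exact_mod_cast h)]
    exact tail1_flat l1 l2 (l1.length - min l1.length l2.length)
      (min l1.length l2.length) (by omega) (by omega)
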